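-- pv_equiv track=rewrite | github.com/zenitsu0509/MedGraphy | ingest_graph.py | parse_side_effects
-- ===== SOURCE A (Python) =====
-- SIDE_EFFECT_END_WORDS = {"pain","bleeding","change","headache","nosebleeds","skin","pressure","protein","urine","inflammation","rash","injury","nausea","diarrhea","insomnia","weight","loss","vomiting","candidiasis","cramps","drowsiness","dizziness","constipation","flatulence","indigestion","heartburn","appetite","weakness","fatigue","fever","redness","swelling","irritation","itching","tremors","palpitations","photophobia","cramp","burn"}
--
-- def parse_side_effects(raw: str) -> list[str]:
--     if not isinstance(raw, str) or not raw.strip():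
--         return []
--     # Prefer comma separation if present
--     if ',' in raw:
--         items = [i.strip() for i in raw.split(',') if i.strip()]
--         return items
--     tokens = raw.split()
--     phrases = []
--     current = []
--     for idx, tok in enumerate(tokens):
--         is_cap = tok[0].isupper()
--         if not current:
--             current.append(tok)
--             continue
--         # If token starts capital and previous phrase seems complete -> start new phrase
--         if is_cap and (current[-1].lower() in SIDE_EFFECT_END_WORDS):
--             phrases.append(' '.join(current))
--             current = [tok]
--         else:
--             current.append(tok)
--     if current:
--         phrases.append(' '.join(current))
--     # Basic cleanup (dedupe, strip)
--     cleaned = []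
--     seen = set()
--     for p in phrases:
--         c = p.strip(' .;:').strip()
--         if c and c.lower() not in seen:
--             cleaned.append(c)
--             seen.add(c.lower())
--     return cleaned
-- ===== SOURCE B (Python) =====
-- SIDE_EFFECT_END_WORDS = {"pain","bleeding","change","headache","nosebleeds","skin","pressure","protein","urine","inflammation","rash","injury","nausea","diarrhea","insomnia","weight","loss","vomiting","candidiasis","cramps","drowsiness","dizziness","constipation","flatulence","indigestion","heartburn","appetite","weakness","fatigue","fever","redness","swelling","irritation","itching","tremors","palpitations","photophobia","cramp","burn"}
--
-- def parse_side_effects(raw: str) -> list[str]: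
--     if not isinstance(raw, str) or not raw.strip():
--         return []
--     # Prefer comma separation if present (same fast path)
--     if ',' in raw:
--         return [i.strip() for i in raw.split(',') if i.strip()]
--     tokens = raw.split()
--     # Stateless scan: collect the boundary indices where a new phrase starts,
--     # then slice the token list at those cut points.
--     cuts = [0] + [i for i in range(1, len(tokens))
--                   if tokens[i][0].isupper() and tokens[i-1].lower() in SIDE_EFFECT_END_WORDS] + [len(tokens)]
--     phrases = [' '.join(tokens[a:b]) for a, b in zip(cuts, cuts[1:])]
--     # Cleanup/dedup via an ordered dict keyed by the lowercased phrase
--     cleaned = {}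
--     for p in phrases:
--         c = p.strip(' .;:').strip()
--         if c and c.lower() not in cleaned:
--             cleaned[c.lower()] = c
--     return list(cleaned.values())
-- ===== Notes on version B (the rewrite author's own statement) =====
-- stated objective: alternative
-- what changed: A's stateful accumulator loop (growing a 'current' phrase and flushing it) is replaced by a staged, stateless pipeline: one comprehension collects the boundary indices where a capitalized token follows an end word, the token list is sliced at those cut points, and dedup/cleanup runs through an ordered dict keyed by the lowercased phrase instead of a list plus seen-set.
import Mathlib
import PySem

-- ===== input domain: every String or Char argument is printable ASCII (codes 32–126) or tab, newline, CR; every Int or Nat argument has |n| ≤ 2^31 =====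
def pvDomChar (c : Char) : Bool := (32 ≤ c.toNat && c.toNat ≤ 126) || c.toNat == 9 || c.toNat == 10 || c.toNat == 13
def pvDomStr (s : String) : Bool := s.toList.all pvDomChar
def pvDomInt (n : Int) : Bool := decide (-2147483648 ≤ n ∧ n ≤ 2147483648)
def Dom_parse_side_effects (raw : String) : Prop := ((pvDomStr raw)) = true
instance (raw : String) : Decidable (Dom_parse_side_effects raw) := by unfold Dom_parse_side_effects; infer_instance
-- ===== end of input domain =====

-- B replaces A's stateful accumulator loop by a staged stateless pipeline: collect boundary
-- indices in one comprehension, slice the token list at those cuts, dedup via an ordered dict;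
-- alternative decomposition, same cost.


-- ===== PORT A =====
-- module-level constant SIDE_EFFECT_END_WORDS (a set of distinct string literals)
def pvEndWords : PySem.Set String := ["pain","bleeding","change","headache","nosebleeds","skin","pressure","protein","urine","inflammation","rash","injury","nausea","diarrhea","insomnia","weight","loss","vomiting","candidiasis","cramps","drowsiness","dizziness","constipation","flatulence","indigestion","heartburn","appetite","weakness","fatigue","fever","redness","swelling","irritation","itching","tremors","palpitations","photophobia","cramp","burn"]

-- tok[0].isupper(); tokens produced by str.split() are nonempty, so the `none` default is unreachable there
def pvIsCap (tok : String) : Bool := (PySem.Str.pyGet? tok 0).elim false PySem.Chars.isupper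

-- current[-1] of a nonempty list (Python raises on []; every use below has current ≠ [])
def pvLast (current : List String) : String := (PySem.List.pyGet? current (-1)).getD ""

def parse_side_effects (raw : String) : List String :=
  if PySem.Str.strip raw = "" then []
  else if PySem.Str.isIn "," raw then
    -- [i.strip() for i in raw.split(',') if i.strip()]  (sep "," ≠ "", so split? is some)
    (((PySem.Str.split? raw ",").getD []).map (fun i => PySem.Str.strip i)).filter (fun i => i ≠ "")
  else
    let tokens := PySem.Str.split₀ raw
    let st := tokens.foldl (fun (st : List String × List String) tok =>
      let is_cap := pvIsCap tok
      if st.2.isEmpty then (st.1, st.2 ++ [tok])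
      else if is_cap && pvEndWords.contains (PySem.Str.lower (pvLast st.2)) then
        (st.1 ++ [PySem.Str.join " " st.2], [tok])
      else (st.1, st.2 ++ [tok])) ([], [])
    let phrases := if st.2.isEmpty then st.1 else st.1 ++ [PySem.Str.join " " st.2]
    let cl := phrases.foldl (fun (st : List String × PySem.Set String) p =>
      let c := PySem.Str.strip (PySem.Str.stripChars p " .;:")
      if c ≠ "" && !(st.2.contains (PySem.Str.lower c)) then
        (st.1 ++ [c], PySem.Set.add st.2 (PySem.Str.lower c))
      else st) ([], [])
    cl.1

-- ===== PORT B =====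
-- Source B: collect the cut indices 1..n-1 where a capitalized token follows an end word, slice the
-- token list at consecutive cut pairs, then dedup through an ordered dict keyed by the lowercase
-- phrase. tokens[i] is always in range (i ∈ range(1,n)), so the `.getD ""` defaults are unreachable.
def parse_side_effects_alt (raw : String) : List String :=
  if PySem.Str.strip raw = "" then []
  else if PySem.Str.isIn "," raw then
    (((PySem.Str.split? raw ",").getD []).map (fun i => PySem.Str.strip i)).filter (fun i => i ≠ "")
  else
    let tokens := PySem.Str.split₀ raw
    let n : Int := tokens.length
    let cuts : List Int := [0] ++ ((PySem.List.pyRange 1 n 1).filter (fun i =>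
        pvIsCap ((PySem.List.pyGet? tokens i).getD "") &&
        pvEndWords.contains (PySem.Str.lower ((PySem.List.pyGet? tokens (i-1)).getD "")))) ++ [n]
    let phrases := (cuts.zip (PySem.List.slice cuts (some 1) none)).map (fun ab =>
        PySem.Str.join " " (PySem.List.slice tokens (some ab.1) (some ab.2)))
    let d := phrases.foldl (fun (d : PySem.Dict String String) p =>
      let c := PySem.Str.strip (PySem.Str.stripChars p " .;:")
      if c ≠ "" && !(d.contains (PySem.Str.lower c)) then d.insert (PySem.Str.lower c) c else d)
      PySem.Dict.empty
    d.values

-- ===== PRECONDITION & SPEC =====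
def Spec_parse_side_effects (raw : String) (out : List String) : Prop := out = parse_side_effects_alt raw
instance (raw : String) (out : List String) : Decidable (Spec_parse_side_effects raw out) := by unfold Spec_parse_side_effects; infer_instance

-- ===== CLAIM (what is proved, stated in full; the proofs are below) =====
def Claim_equal_parse_side_effects : Prop := ∀ (raw : String), Dom_parse_side_effects raw → Spec_parse_side_effects raw (parse_side_effects raw)

-- ===== LEMMAS AND PROOFS =====

-- A's accumulator step (definitionally the lambda in parse_side_effects)
def pvStepA (st : List String × List String) (tok : String) : List String × List String :=
  let is_cap := pvIsCap tok
  if st.2.isEmpty then (st.1, st.2 ++ [tok])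
  else if is_cap && pvEndWords.contains (PySem.Str.lower (pvLast st.2)) then
    (st.1 ++ [PySem.Str.join " " st.2], [tok])
  else (st.1, st.2 ++ [tok])

-- A's cleanup step and B's dict step (definitionally the lambdas in the ports)
def pvStepC (st : List String × PySem.Set String) (p : String) : List String × PySem.Set String :=
  let c := PySem.Str.strip (PySem.Str.stripChars p " .;:")
  if c ≠ "" && !(st.2.contains (PySem.Str.lower c)) then
    (st.1 ++ [c], PySem.Set.add st.2 (PySem.Str.lower c))
  else st

def pvStepD (d : PySem.Dict String String) (p : String) : PySem.Dict String String :=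
  let c := PySem.Str.strip (PySem.Str.stripChars p " .;:")
  if c ≠ "" && !(d.contains (PySem.Str.lower c)) then d.insert (PySem.Str.lower c) c else d

def pvHead (g : List String) : String := match g with | [] => "" | x :: _ => x

def pvHeadCap (g : List String) : Bool := match g with | [] => false | x :: _ => pvIsCap x

def pvFlush (st : List String × List String) : List String :=
  if st.2.isEmpty then st.1 else st.1 ++ [PySem.Str.join " " st.2]

-- the break test A performs on state (…, c) before token t
def pvBreak (t : String) (c : List String) : Bool :=
  pvIsCap t && pvEndWords.contains (PySem.Str.lower (pvLast c))

-- grouping of the token list as a right fold with one-group lookahead (proof intermediate)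
def pvGroup (tokens : List String) : List (List String) :=
  tokens.foldr (fun t groups =>
    match groups with
    | [] => [[t]]
    | g :: gs =>
      if pvHeadCap g && pvEndWords.contains (PySem.Str.lower t) then [t] :: g :: gs
      else (t :: g) :: gs) []

-- glue a pending (possibly empty) current phrase onto already-formed groups
def pvGlue (c : List String) (gs : List (List String)) : List (List String) :=
  if c.isEmpty then gs
  else match gs with
    | [] => [c]
    | g :: gs' => if pvBreak (pvHead g) c then c :: g :: gs' else (c ++ g) :: gs'

theorem pvLast_append_singleton (c : List String) (t : String) : pvLast (c ++ [t]) = t := by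
  simp [pvLast, PySem.List.pyGet?, PySem.List.pyIdx?]

theorem pvLast_singleton (t : String) : pvLast [t] = t := rfl

theorem pvGroup_nil : pvGroup [] = [] := rfl

theorem pvHeadCap_eq (g : List String) : pvHeadCap g = pvIsCap (pvHead g) := by
  cases g <;> rfl

theorem pvGroup_cons (t : String) (ts : List String) :
    pvGroup (t :: ts) = match pvGroup ts with
      | [] => [[t]]
      | g :: gs => if pvHeadCap g && pvEndWords.contains (PySem.Str.lower t) then [t] :: g :: gs
                   else (t :: g) :: gs := rfl

theorem pvGroup_eq_nil (t : String) (ts : List String) (hg : pvGroup ts = []) :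
    pvGroup (t :: ts) = [[t]] := by rw [pvGroup_cons, hg]

theorem pvGroup_eq_cons (t : String) (ts : List String) (g : List String) (gs : List (List String))
    (hg : pvGroup ts = g :: gs) :
    pvGroup (t :: ts) = if pvHeadCap g && pvEndWords.contains (PySem.Str.lower t)
      then [t] :: g :: gs else (t :: g) :: gs := by rw [pvGroup_cons, hg]

theorem pvGroup_shape (x : String) (xs : List String) :
    ∃ g gs, pvGroup (x :: xs) = (x :: g) :: gs := by
  cases hg : pvGroup xs with
  | nil => exact ⟨[], [], by rw [pvGroup_eq_nil x xs hg]⟩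
  | cons g gs =>
    rw [pvGroup_eq_cons x xs g gs hg]
    by_cases h : (pvHeadCap g && pvEndWords.contains (PySem.Str.lower x)) = true
    · exact ⟨[], g :: gs, by rw [if_pos h]⟩
    · exact ⟨g, gs, by rw [if_neg h]⟩

-- main grouping invariant: A's accumulator loop + final flush = glue current onto the right-fold groups
theorem pv_group_inv (tokens : List String) : ∀ (phrases current : List String),
    pvFlush (tokens.foldl pvStepA (phrases, current)) =
    phrases ++ (pvGlue current (pvGroup tokens)).map (fun g => PySem.Str.join " " g) := by
  induction tokens with
  | nil =>
    intro phrases current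
    by_cases hc : current.isEmpty <;> simp [pvFlush, pvGlue, hc, pvGroup_nil]
  | cons t ts ih =>
    intro phrases current
    simp only [List.foldl_cons]
    by_cases hc : current.isEmpty
    · have hce : current = [] := List.isEmpty_iff.mp hc
      subst hce
      rw [show pvStepA (phrases, []) t = (phrases, [t]) from by simp [pvStepA], ih]
      have hglue : pvGlue [t] (pvGroup ts) = pvGroup (t :: ts) := by
        cases hg : pvGroup ts with
        | nil => rw [pvGroup_eq_nil t ts hg]; simp [pvGlue]
        | cons g gs =>
          rw [pvGroup_eq_cons t ts g gs hg]
          simp only [pvGlue, List.isEmpty_cons, Bool.false_eq_true, if_false, pvBreak,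
            pvLast_singleton, pvHeadCap_eq, List.singleton_append]
      rw [hglue]
      simp [pvGlue]
    · have hc' : current.isEmpty = false := by simpa using hc
      have hbe : (pvIsCap t && pvEndWords.contains (PySem.Str.lower (pvLast current))) =
          pvBreak t current := rfl
      by_cases hb : pvBreak t current = true
      · have hstep : pvStepA (phrases, current) t =
            (phrases ++ [PySem.Str.join " " current], [t]) := by
          simp only [pvStepA]
          rw [hbe, hb, hc']
          simp
        rw [hstep, ih]
        have hglue : pvGlue current (pvGroup (t :: ts)) = current :: pvGlue [t] (pvGroup ts) := by
          cases hg : pvGroup ts with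
          | nil => rw [pvGroup_eq_nil t ts hg]; simp [pvGlue, hc', pvHead, hb]
          | cons g gs =>
            rw [pvGroup_eq_cons t ts g gs hg]
            have h1' : pvBreak (pvHead g) [t] =
                (pvHeadCap g && pvEndWords.contains (PySem.Str.lower t)) := by
              simp [pvBreak, pvLast_singleton, pvHeadCap_eq]
            by_cases h2 : (pvHeadCap g && pvEndWords.contains (PySem.Str.lower t)) = true
            · rw [if_pos h2]
              simp only [pvGlue, hc', Bool.false_eq_true, if_false, List.isEmpty_cons]
              rw [show pvHead [t] = t from rfl, hb, h1', h2]
              simp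
            · rw [if_neg h2]
              rw [Bool.not_eq_true] at h2
              simp only [pvGlue, hc', Bool.false_eq_true, if_false, List.isEmpty_cons]
              rw [show pvHead (t :: g) = t from rfl, hb, h1', h2]
              simp
        rw [hglue]
        simp
      · have hb' : pvBreak t current = false := by
          rwa [Bool.not_eq_true] at hb
        have hstep : pvStepA (phrases, current) t = (phrases, current ++ [t]) := by
          simp only [pvStepA]
          rw [hbe, hb', hc']
          simp
        rw [hstep, ih]
        have hbt : ∀ g : List String, pvBreak (pvHead g) (current ++ [t]) =
            (pvHeadCap g && pvEndWords.contains (PySem.Str.lower t)) := by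
          intro g
          simp [pvBreak, pvLast_append_singleton, pvHeadCap_eq]
        have hglue : pvGlue current (pvGroup (t :: ts)) = pvGlue (current ++ [t]) (pvGroup ts) := by
          cases hg : pvGroup ts with
          | nil =>
            rw [pvGroup_eq_nil t ts hg]
            have hce : (current ++ [t]).isEmpty = false := by simp
            simp only [pvGlue, hc', hce, Bool.false_eq_true, if_false]
            rw [show pvHead [t] = t from rfl, hb']
            simp
          | cons g gs =>
            rw [pvGroup_eq_cons t ts g gs hg]
            have hce : (current ++ [t]).isEmpty = false := by simp
            by_cases h2 : (pvHeadCap g && pvEndWords.contains (PySem.Str.lower t)) = true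
            · rw [if_pos h2]
              simp only [pvGlue, hc', hce, Bool.false_eq_true, if_false]
              rw [show pvHead [t] = t from rfl, hb', hbt g, h2]
              simp
            · rw [if_neg h2]
              rw [Bool.not_eq_true] at h2
              simp only [pvGlue, hc', hce, Bool.false_eq_true, if_false]
              rw [show pvHead (t :: g) = t from rfl, hb', hbt g, h2]
              simp
        rw [hglue]

-- cleanup invariant: list+seen-set fold vs ordered-dict fold, related by items = seen.zip cleaned
theorem pv_cleanup_inv (ps : List String) : ∀ (cleaned seen : List String) (d : PySem.Dict String String),
    d.items = seen.zip cleaned → seen.length = cleaned.length →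
    (ps.foldl pvStepC (cleaned, seen)).1 = (ps.foldl pvStepD d).values := by
  induction ps with
  | nil =>
    intro cleaned seen d hd hlen
    simp only [List.foldl_nil, PySem.Dict.values, hd]
    exact (List.map_snd_zip (le_of_eq hlen.symm)).symm
  | cons p ps ih =>
    intro cleaned seen d hd hlen
    simp only [List.foldl_cons]
    have hcont : d.contains (PySem.Str.lower (PySem.Str.strip (PySem.Str.stripChars p " .;:"))) =
        seen.contains (PySem.Str.lower (PySem.Str.strip (PySem.Str.stripChars p " .;:"))) := by
      simp only [PySem.Dict.contains, hd]
      rw [show (fun (pr : String × String) =>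
            pr.1 == PySem.Str.lower (PySem.Str.strip (PySem.Str.stripChars p " .;:"))) =
          ((fun x => x == PySem.Str.lower (PySem.Str.strip (PySem.Str.stripChars p " .;:"))) ∘
            Prod.fst) from rfl]
      rw [← List.any_map, List.map_fst_zip (le_of_eq hlen)]
      exact List.any_beq'
    by_cases h0 : PySem.Str.strip (PySem.Str.stripChars p " .;:") = ""
    · rw [show pvStepC (cleaned, seen) p = (cleaned, seen) from by simp [pvStepC, h0],
        show pvStepD d p = d from by simp [pvStepD, h0]]
      exact ih cleaned seen d hd hlen
    · by_cases hseen : seen.contains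
          (PySem.Str.lower (PySem.Str.strip (PySem.Str.stripChars p " .;:"))) = true
      · have hm : PySem.Str.lower (PySem.Str.strip (PySem.Str.stripChars p " .;:")) ∈ seen := by
          simpa using hseen
        rw [show pvStepC (cleaned, seen) p = (cleaned, seen) from by simp [pvStepC, hm],
          show pvStepD d p = d from by simp [pvStepD, hcont, hm]]
        exact ih cleaned seen d hd hlen
      · have hseen' : seen.contains
            (PySem.Str.lower (PySem.Str.strip (PySem.Str.stripChars p " .;:"))) = false := by
          rwa [Bool.not_eq_true] at hseen
        have hm : PySem.Str.lower (PySem.Str.strip (PySem.Str.stripChars p " .;:")) ∉ seen := by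
          simpa using hseen'
        rw [show pvStepC (cleaned, seen) p =
            (cleaned ++ [PySem.Str.strip (PySem.Str.stripChars p " .;:")],
             seen ++ [PySem.Str.lower (PySem.Str.strip (PySem.Str.stripChars p " .;:"))]) from by
              simp [pvStepC, h0, hm, PySem.Set.add, PySem.Set.contains],
          show pvStepD d p = PySem.Dict.mk (d.items ++
            [(PySem.Str.lower (PySem.Str.strip (PySem.Str.stripChars p " .;:")),
              PySem.Str.strip (PySem.Str.stripChars p " .;:"))]) from by
              simp [pvStepD, h0, hcont, hm, PySem.Dict.insert]]
        refine ih _ _ _ ?_ ?_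
        · simp only [hd]
          exact (List.zip_append
            (r₁ := [PySem.Str.lower (PySem.Str.strip (PySem.Str.stripChars p " .;:"))])
            (r₂ := [PySem.Str.strip (PySem.Str.stripChars p " .;:")]) hlen).symm
        · simp [hlen]

-- ---- B-side characterisation: cut indices at Nat level ----

-- the break test between tokens i-1 and i of ts (i ≥ 1 in every use)
def pvBrkAt (ts : List String) (i : Nat) : Bool :=
  pvIsCap (ts[i]?.getD "") && pvEndWords.contains (PySem.Str.lower (ts[i-1]?.getD ""))

-- Nat-level cut list: 0, the interior breaks (shifted to 1-based), the length
def pvCutsN (ts : List String) : List Nat :=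
  0 :: ((List.range (ts.length - 1)).filter (fun k => pvBrkAt ts (k+1))).map (·+1) ++ [ts.length]

-- slice ts at consecutive members of a cut list
def pvSl (ts : List String) : List Nat → List (List String)
  | a :: b :: l => (ts.drop a).take (b - a) :: pvSl ts (b :: l)
  | _ => []

theorem pvSl_eq_zip (ts : List String) (cuts : List Nat) :
    (cuts.zip cuts.tail).map (fun ab => (ts.drop ab.1).take (ab.2 - ab.1)) = pvSl ts cuts := by
  induction cuts with
  | nil => rfl
  | cons a l ih =>
    cases l with
    | nil => rfl
    | cons b l2 => simpa [pvSl] using ih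

theorem pvSl_shift (t : String) (ts : List String) (l : List Nat) :
    pvSl (t :: ts) (l.map (·+1)) = pvSl ts l := by
  induction l with
  | nil => rfl
  | cons a l ih =>
    cases l with
    | nil => rfl
    | cons b l2 =>
      simp only [List.map_cons, pvSl, List.drop_succ_cons, Nat.succ_sub_succ] at *
      rw [ih]

theorem pvBrkAt_shift (x : String) (ts : List String) (k : Nat) :
    pvBrkAt (x :: ts) (k+2) = pvBrkAt ts (k+1) := by
  simp [pvBrkAt]

-- recurrence for the interior cuts when a token is peeled off the front
theorem pvMids_cons (t u : String) (r : List String) :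
    ((List.range ((t::u::r).length - 1)).filter (fun k => pvBrkAt (t::u::r) (k+1))).map (·+1) =
    (if pvBrkAt (t::u::r) 1 then [1] else []) ++
      ((((List.range ((u::r).length - 1)).filter (fun k => pvBrkAt (u::r) (k+1))).map (·+1)).map (·+1)) := by
  have hlen : (t::u::r).length - 1 = r.length + 1 := by simp
  have hlen' : (u::r).length - 1 = r.length := by simp
  rw [hlen, hlen', List.range_succ_eq_map, List.filter_cons]
  rw [List.filter_map]
  have hfun : ((fun k => pvBrkAt (t::u::r) (k+1)) ∘ Nat.succ) =
      (fun k => pvBrkAt (u::r) (k+1)) := by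
    funext k
    simp only [Function.comp]
    exact pvBrkAt_shift t (u::r) k
  rw [hfun]
  by_cases hb : pvBrkAt (t::u::r) 1 = true
  · rw [if_pos hb, if_pos hb]
    simp [List.map_map, Function.comp, Nat.succ_eq_add_one]
  · rw [if_neg (by simpa using hb), if_neg (by simpa using hb)]
    simp [List.map_map, Function.comp, Nat.succ_eq_add_one]

-- slicing at the cut list recovers exactly the right-fold grouping
theorem pvSl_cuts_eq_group : ∀ ts : List String, ts ≠ [] → pvSl ts (pvCutsN ts) = pvGroup ts := by
  intro ts
  induction ts with
  | nil => intro h; exact absurd rfl h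
  | cons t rest ih =>
    intro _
    cases rest with
    | nil =>
      simp [pvCutsN, pvSl, pvGroup]
    | cons u r =>
      have hmids := pvMids_cons t u r
      obtain ⟨g', gs, hgshape⟩ := pvGroup_shape u r
      have ihr := ih (by simp)
      -- unfold the cut list of u::r
      have hcuts' : pvCutsN (u::r) =
          0 :: (((List.range ((u::r).length - 1)).filter (fun k => pvBrkAt (u::r) (k+1))).map (·+1) ++ [(u::r).length]) := rfl
      set M := ((List.range ((u::r).length - 1)).filter (fun k => pvBrkAt (u::r) (k+1))).map (·+1) with hM
      by_cases hb : pvBrkAt (t::u::r) 1 = true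
      · -- break between t and u: groups are [t] :: groups (u::r)
        have hcuts : pvCutsN (t::u::r) = 0 :: (pvCutsN (u::r)).map (·+1) := by
          simp only [pvCutsN, hmids, hb, if_pos, ← hM]
          simp [List.length_cons]
        rw [hcuts, hcuts']
        simp only [List.map_cons]
        rw [show pvSl (t::u::r) (0 :: (0+1) :: (M ++ [(u::r).length]).map (·+1)) =
            ((t::u::r).drop 0).take 1 :: pvSl (t::u::r) ((0 :: (M ++ [(u::r).length])).map (·+1)) from rfl]
        rw [pvSl_shift, ← hcuts', ihr, hgshape]
        have hcond : (pvHeadCap (u :: g') && pvEndWords.contains (PySem.Str.lower t)) = true := by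
          rw [show pvHeadCap (u :: g') = pvIsCap u from rfl]
          simpa [pvBrkAt] using hb
        rw [pvGroup_eq_cons t (u::r) (u::g') gs hgshape, if_pos hcond]
        simp
      · -- no break: t is prepended to the first group of u::r
        have hb' : pvBrkAt (t::u::r) 1 = false := by simpa using hb
        have hcuts : pvCutsN (t::u::r) = 0 :: (M ++ [(u::r).length]).map (·+1) := by
          simp only [pvCutsN, hmids, hb', Bool.false_eq_true, if_false]
          simp [List.length_cons]
        obtain ⟨c, l, hT⟩ : ∃ c l, M ++ [(u::r).length] = c :: l := by
          cases hMc : M ++ [(u::r).length] with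
          | nil => exact absurd hMc (by simp)
          | cons c l => exact ⟨c, l, rfl⟩
        have hIH : ((u::r).drop 0).take (c - 0) :: pvSl (u::r) (c :: l) = (u :: g') :: gs := by
          rw [← hgshape, ← ihr, hcuts', hT]
          rfl
        rw [List.cons_eq_cons] at hIH
        obtain ⟨htake, hrest⟩ := hIH
        simp only [List.drop_zero, Nat.sub_zero] at htake
        rw [hcuts, hT]
        simp only [List.map_cons]
        rw [show pvSl (t::u::r) (0 :: (c+1) :: l.map (·+1)) =
            ((t::u::r).drop 0).take (c+1 - 0) :: pvSl (t::u::r) ((c+1) :: l.map (·+1)) from rfl]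
        rw [show ((c+1) :: l.map (·+1)) = (c :: l).map (·+1) from rfl, pvSl_shift, hrest]
        have hcond : (pvHeadCap (u :: g') && pvEndWords.contains (PySem.Str.lower t)) = false := by
          rw [show pvHeadCap (u :: g') = pvIsCap u from rfl]
          simpa [pvBrkAt] using hb'
        rw [pvGroup_eq_cons t (u::r) (u::g') gs hgshape, if_neg (ne_true_of_eq_false hcond)]
        simp only [List.drop_zero, Nat.sub_zero, List.take_succ_cons, htake]

-- bridge: port B's Int-level cut/zip/slice pipeline equals the Nat-level pvSl slices, joined
theorem pvB_bridge (ts : List String) :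
    (([(0:Int)] ++ ((PySem.List.pyRange 1 (ts.length : Int) 1).filter (fun i =>
        pvIsCap ((PySem.List.pyGet? ts i).getD "") &&
        pvEndWords.contains (PySem.Str.lower ((PySem.List.pyGet? ts (i-1)).getD "")))) ++ [(ts.length : Int)]).zip
      (PySem.List.slice ([(0:Int)] ++ ((PySem.List.pyRange 1 (ts.length : Int) 1).filter (fun i =>
        pvIsCap ((PySem.List.pyGet? ts i).getD "") &&
        pvEndWords.contains (PySem.Str.lower ((PySem.List.pyGet? ts (i-1)).getD "")))) ++ [(ts.length : Int)]) (some 1) none)).map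
      (fun ab => PySem.Str.join " " (PySem.List.slice ts (some ab.1) (some ab.2)))
    = (pvSl ts (pvCutsN ts)).map (PySem.Str.join " ") := by
  have hcast : ([(0:Int)] ++ ((PySem.List.pyRange 1 (ts.length : Int) 1).filter (fun i =>
        pvIsCap ((PySem.List.pyGet? ts i).getD "") &&
        pvEndWords.contains (PySem.Str.lower ((PySem.List.pyGet? ts (i-1)).getD "")))) ++ [(ts.length : Int)])
      = (pvCutsN ts).map (fun k : Nat => (k : Int)) := by
    rw [PySem.List.pyRange_one]
    have htn : ((ts.length : Int) - 1).toNat = ts.length - 1 := by omega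
    rw [htn]
    have hmap : (List.range (ts.length - 1)).map (fun k : Nat => (1:Int) + k) =
        (List.range (ts.length - 1)).map (fun k : Nat => ((k+1 : Nat) : Int)) := by
      apply List.map_congr_left
      intro k _
      push_cast
      ring
    rw [hmap, List.filter_map]
    have hfun : ((fun i : Int =>
        pvIsCap ((PySem.List.pyGet? ts i).getD "") &&
        pvEndWords.contains (PySem.Str.lower ((PySem.List.pyGet? ts (i-1)).getD ""))) ∘
        (fun k : Nat => ((k+1 : Nat) : Int))) = (fun k => pvBrkAt ts (k+1)) := by
      funext k
      have h1 : ((k+1 : Nat) : Int) - 1 = ((k : Nat) : Int) := by push_cast; ring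
      simp only [Function.comp, h1, PySem.List.pyGet?_natCast, pvBrkAt]
      simp
    rw [hfun]
    simp [pvCutsN, List.map_map, Function.comp]
  rw [hcast, PySem.List.slice_from_one]
  rw [show ((pvCutsN ts).map (fun k : Nat => (k : Int))).tail =
      (pvCutsN ts).tail.map (fun k : Nat => (k : Int)) from by
    cases pvCutsN ts <;> rfl]
  rw [List.zip_map, List.map_map]
  rw [← pvSl_eq_zip, List.map_map]
  apply List.map_congr_left
  intro ab _
  simp only [Function.comp, Prod.map]
  rw [PySem.List.slice_natCast]

-- pvA/pvB: the two port bodies with their inline lambdas named (definitionally equal to the ports)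
def pvA (raw : String) : List String :=
  if PySem.Str.strip raw = "" then []
  else if PySem.Str.isIn "," raw then
    (((PySem.Str.split? raw ",").getD []).map (fun i => PySem.Str.strip i)).filter (fun i => i ≠ "")
  else
    ((pvFlush ((PySem.Str.split₀ raw).foldl pvStepA ([], []))).foldl pvStepC ([], [])).1

def pvB (raw : String) : List String :=
  if PySem.Str.strip raw = "" then []
  else if PySem.Str.isIn "," raw then
    (((PySem.Str.split? raw ",").getD []).map (fun i => PySem.Str.strip i)).filter (fun i => i ≠ "")
  else
    ((([(0:Int)] ++ ((PySem.List.pyRange 1 ((PySem.Str.split₀ raw).length : Int) 1).filter (fun i =>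
        pvIsCap ((PySem.List.pyGet? (PySem.Str.split₀ raw) i).getD "") &&
        pvEndWords.contains (PySem.Str.lower ((PySem.List.pyGet? (PySem.Str.split₀ raw) (i-1)).getD "")))) ++ [((PySem.Str.split₀ raw).length : Int)]).zip
      (PySem.List.slice ([(0:Int)] ++ ((PySem.List.pyRange 1 ((PySem.Str.split₀ raw).length : Int) 1).filter (fun i =>
        pvIsCap ((PySem.List.pyGet? (PySem.Str.split₀ raw) i).getD "") &&
        pvEndWords.contains (PySem.Str.lower ((PySem.List.pyGet? (PySem.Str.split₀ raw) (i-1)).getD "")))) ++ [((PySem.Str.split₀ raw).length : Int)]) (some 1) none)).map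
      (fun ab => PySem.Str.join " " (PySem.List.slice (PySem.Str.split₀ raw) (some ab.1) (some ab.2)))).foldl pvStepD PySem.Dict.empty
      |>.values

theorem pvA_eq (raw : String) : parse_side_effects raw = pvA raw := rfl

theorem pvB_eq (raw : String) : parse_side_effects_alt raw = pvB raw := rfl

theorem pvAB (raw : String) : pvA raw = pvB raw := by
  unfold pvA pvB
  by_cases h1 : PySem.Str.strip raw = ""
  · simp [h1]
  · rw [if_neg h1, if_neg h1]
    by_cases h2 : PySem.Str.isIn "," raw = true
    · rw [if_pos h2, if_pos h2]
    · rw [if_neg h2, if_neg h2]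
      have hg := pv_group_inv (PySem.Str.split₀ raw) [] []
      simp only [pvGlue, List.isEmpty_nil, if_true, List.nil_append] at hg
      rw [hg, pvB_bridge]
      by_cases hts : PySem.Str.split₀ raw = []
      · rw [hts]
        decide
      · rw [pvSl_cuts_eq_group _ hts]
        exact pv_cleanup_inv _ [] [] PySem.Dict.empty rfl rfl

-- ===== VERDICT (by name: the statement is the Claim_ definition above) =====
theorem parse_side_effects_spec : Claim_equal_parse_side_effects := by
  intro raw _
  unfold Spec_parse_side_effects
  rw [pvA_eq, pvB_eq, pvAB]
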